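-- pv_equiv track=rewrite | github.com/elbaulp/grado_informatica_criptografia | P2/streamciphers/utils.py | Runs
-- ===== SOURCE A (Python) =====
-- def Runs(b):
--     """
--         @params: The bit sequence to calculate the runs
--
--         @return: A dict with the number of runs, key = #run, value, how many
--         runs are for that run
--     """
--     # https://github.com/fnavarrogonzalez/criptography/blob/master/p2.py
--
--     runs = {}
--     run = 1
--
--     i=0
--     # Shift the string if begin and end are the same
--     while b[0] == b[len(b)-1]:
--         if i > len(b):
--             return dict()
--         b = b[1:] + b[0]
--         i+=1
--
--     # Add 0 or one to the end in order to count the last run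
--     if(b[len(b)-1]=="1"):
--         b+="0"
--     else:
--         b+="1"
--
--     for i in range(0,len(b)-1):
--         if b[i] == b[i+1]:
--             run+=1
--         else:
--             try:
--                 k = runs.get(run,0)
--                 runs[run] = k + 1
--             except:
--                 runs[run]=[i]
--             run = 1
--
--     return runs
-- ===== SOURCE B (Python) =====
-- def Runs(b):
--     n = len(b)
--     if n == 0:
--         raise IndexError("empty sequence")
--     if b.count(b[0]) == n:
--         # uniform sequence: A's rotation never finds a boundary and yields {}
--         return {}
--     # rotation offset: first cyclic boundary (b[i] != b[i-1], with b[-1] the last char)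
--     r = next(i for i in range(n) if b[i] != b[i - 1])
--     s = b[r:] + b[:r]
--     runs = {}
--     run = 1
--     for j in range(1, n):
--         if s[j] == s[j - 1]:
--             run += 1
--         else:
--             runs[run] = runs.get(run, 0) + 1
--             run = 1
--     runs[run] = runs.get(run, 0) + 1
--     return runs
-- ===== Notes on version B (the rewrite author's own statement) =====
-- stated objective: faster
-- what changed: B finds the first cyclic boundary by direct index search and rotates once with two slices, instead of A's repeated one-character rotate-and-retest (each building a new string), and counts runs in one pass with a final flush instead of appending a sentinel character.
import Mathlib
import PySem

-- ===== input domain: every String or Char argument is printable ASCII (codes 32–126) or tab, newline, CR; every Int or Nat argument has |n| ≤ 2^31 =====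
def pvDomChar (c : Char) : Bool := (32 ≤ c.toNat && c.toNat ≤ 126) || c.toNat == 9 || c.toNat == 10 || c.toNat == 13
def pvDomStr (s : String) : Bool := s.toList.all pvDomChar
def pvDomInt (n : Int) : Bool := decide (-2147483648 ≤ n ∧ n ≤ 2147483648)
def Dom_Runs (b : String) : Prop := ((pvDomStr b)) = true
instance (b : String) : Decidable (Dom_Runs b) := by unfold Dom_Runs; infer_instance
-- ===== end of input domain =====

-- B replaces A's repeated rotate-by-one scan (quadratic on strings with long cyclic
-- runs at the seam) by a direct search for the first cyclic boundary, one O(n) rotation,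
-- and a single run-counting pass with a final flush instead of A's appended sentinel char.

-- ===== PORT A =====
-- A's rotation loop: `while b[0] == b[len(b)-1]: if i > len(b): return {}; b = b[1:] + b[0]; i += 1`.
-- `none` = the `return dict()` exit; fuel only makes the while-loop total: it never runs
-- out before the `i > len(b)` guard fires (the length is invariant under the rotation).
def RunsRot (fuel : Nat) (b : List Char) (i : Nat) : Option (List Char) :=
  match fuel with
  | 0 => none
  | fuel + 1 =>
    if b[0]? = b.getLast? then          -- b[0] == b[len(b)-1]
      if b.length < i then none         -- if i > len(b): return dict()
      else RunsRot fuel (b.drop 1 ++ b.take 1) (i + 1)   -- b = b[1:] + b[0]; i += 1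
    else some b

-- A's counting loop `for i in range(0, len(b)-1)`, run over the adjacent pairs (b[i], b[i+1]);
-- state = (runs, run); the dead `try/except` around `runs.get` is omitted (get never raises).
def RunsStep (st : PySem.Dict Int Int × Int) (p : Char × Char) : PySem.Dict Int Int × Int :=
  if p.1 = p.2 then (st.1, st.2 + 1)
  else (st.1.insert st.2 (st.1.getD st.2 0 + 1), 1)

-- if b[len(b)-1] == "1": b += "0" else: b += "1", then count over the pairs (b[i], b[i+1])
def RunsCount (c : List Char) : List (Int × Int) :=
  (((c ++ [if c.getLast? = some '1' then '0' else '1']).zip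
    (c ++ [if c.getLast? = some '1' then '0' else '1']).tail).foldl
      RunsStep (PySem.Dict.empty, 1)).1.items

def Runs (b : String) : List (Int × Int) :=
  match RunsRot (b.toList.length + 2) b.toList 0 with
  | none => []                          -- `return dict()` (also b = "", where A raises IndexError: excluded by Pre_)
  | some c => RunsCount c

-- ===== PORT B =====
-- `next(i for i in range(n) if b[i] != b[i-1])` (b[-1] = last char); none = StopIteration.
def FindBnd (bs : List Char) (n i : Nat) : Option Nat :=
  if _h : i < n then
    if PySem.List.pyGet? bs (i : Int) ≠ PySem.List.pyGet? bs ((i : Int) - 1) then some i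
    else FindBnd bs n (i + 1)
  else none
termination_by n - i

-- B's single pass over the rotated string, carrying the previous char and the open run,
-- flushing the last run after the loop.
def CountRuns (runs : PySem.Dict Int Int) (run : Int) (prev : Char) :
    List Char → PySem.Dict Int Int
  | [] => runs.insert run (runs.getD run 0 + 1)
  | c :: rest =>
    if c = prev then CountRuns runs (run + 1) c rest
    else CountRuns (runs.insert run (runs.getD run 0 + 1)) 1 c rest

def Runs_alt (b : String) : List (Int × Int) :=
  if b.toList.length = 0 then []        -- B raises IndexError here: excluded by Pre_
  else if b.toList.count (b.toList.headD ' ') = b.toList.length then []  -- uniform: b.count(b[0]) == n → {}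
  else
    match FindBnd b.toList b.toList.length 0 with
    | none => []                        -- unreachable: a non-uniform string has a cyclic boundary
    | some r =>
      match b.toList.drop r ++ b.toList.take r with  -- s = b[r:] + b[:r]
      | [] => []                        -- unreachable: s is a permutation of the nonempty b
      | c :: rest => (CountRuns PySem.Dict.empty 1 c rest).items

-- ===== PRECONDITION & SPEC =====
-- Pre_ excludes only the empty string, where A (and B) raise IndexError on b[0].
def Pre_Runs (b : String) : Prop := b ≠ ""
instance (b : String) : Decidable (Pre_Runs b) := by unfold Pre_Runs; infer_instance

def pvWitness_Runs : String := "0110100"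

def Spec_Runs (b : String) (out : List (Int × Int)) : Prop := out = Runs_alt b
instance (b : String) (out : List (Int × Int)) : Decidable (Spec_Runs b out) := by unfold Spec_Runs; infer_instance

-- ===== CLAIM (what is proved, stated in full; the proofs are below) =====
def Claim_equal_Runs : Prop := ∀ (b : String), Dom_Runs b → Pre_Runs b → Spec_Runs b (Runs b)


-- ===== LEMMAS AND PROOFS =====

-- the i-th left rotation of bs
def rotL (bs : List Char) (i : Nat) : List Char := bs.drop i ++ bs.take i

lemma rotL_zero (bs : List Char) : rotL bs 0 = bs := by simp [rotL]

lemma rotL_length (bs : List Char) (i : Nat) : (rotL bs i).length = bs.length := by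
  simp [rotL]; omega

lemma rotL_step (bs : List Char) (i : Nat) (h : i < bs.length) :
    (rotL bs i).drop 1 ++ (rotL bs i).take 1 = rotL bs (i + 1) := by
  unfold rotL
  rw [List.drop_append_of_le_length (by simp; omega),
      List.take_append_of_le_length (by simp; omega),
      List.drop_drop, List.take_one, List.head?_drop, List.append_assoc,
      ← List.take_add_one]

lemma rotL_head? (bs : List Char) (i : Nat) (h : i < bs.length) :
    (rotL bs i)[0]? = bs[i]? := by
  unfold rotL
  rw [← List.head?_eq_getElem?, List.head?_append]
  simp [List.head?_drop, List.getElem?_eq_getElem h]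

lemma rotL_getLast?_pos (bs : List Char) (i : Nat) (h0 : 0 < i) (h : i ≤ bs.length) :
    (rotL bs i).getLast? = bs[i - 1]? := by
  unfold rotL
  rw [List.getLast?_append]
  have ht : (bs.take i).getLast? = bs[i-1]? := by
    rw [List.getLast?_eq_getElem?, List.length_take, Nat.min_eq_left h,
        List.getElem?_take_of_lt (by omega)]
  rw [ht, List.getElem?_eq_getElem (by omega)]
  rfl

-- the FindBnd test at i is exactly A's while-test (negated) on the i-th rotation
lemma bnd_cond (bs : List Char) (i : Nat) (h : i < bs.length) :
    (PySem.List.pyGet? bs (i : Int) ≠ PySem.List.pyGet? bs ((i : Int) - 1))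
      ↔ ¬ ((rotL bs i)[0]? = (rotL bs i).getLast?) := by
  rw [PySem.List.pyGet?_natCast, rotL_head? bs i h]
  rcases Nat.eq_zero_or_pos i with h0 | h0
  · subst h0
    simp only [Nat.cast_zero, zero_sub, PySem.List.pyGet?_neg_one, rotL_zero]
  · have : (i : Int) - 1 = ((i - 1 : Nat) : Int) := by omega
    rw [this, PySem.List.pyGet?_natCast, rotL_getLast?_pos bs i h0 (by omega)]

lemma FindBnd_ge_aux (bs : List Char) (n : Nat) : ∀ fuel i r : Nat, n - i ≤ fuel →
    FindBnd bs n i = some r → i ≤ r ∧ r < n := by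
  intro fuel
  induction fuel with
  | zero =>
    intro i r hfi hfb
    rw [FindBnd, dif_neg (by omega)] at hfb
    simp at hfb
  | succ f IH =>
    intro i r hfi hfb
    by_cases hin : i < n
    · rw [FindBnd, dif_pos hin] at hfb
      by_cases hcond : PySem.List.pyGet? bs (i : Int) ≠ PySem.List.pyGet? bs ((i : Int) - 1)
      · rw [if_pos hcond] at hfb
        have := Option.some.inj hfb
        omega
      · rw [if_neg hcond] at hfb
        have := IH (i+1) r (by omega) hfb
        omega
    · rw [FindBnd, dif_neg hin] at hfb
      simp at hfb

lemma FindBnd_ge (bs : List Char) (n : Nat) (i r : Nat)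
    (hfb : FindBnd bs n i = some r) : i ≤ r ∧ r < n :=
  FindBnd_ge_aux bs n n i r (by omega) hfb

-- main rotation lemma: A's while-loop lands exactly on B's rotation
lemma RunsRot_eq_rot (bs : List Char) (r : Nat) :
    ∀ fuel i, i ≤ r → FindBnd bs bs.length i = some r → r - i < fuel →
      RunsRot fuel (rotL bs i) i = some (rotL bs r) := by
  intro fuel
  induction fuel with
  | zero => intro i _ _ hf; omega
  | succ f IH =>
    intro i hir hfb hf
    have hge := FindBnd_ge bs bs.length i r hfb
    have hin : i < bs.length := by
      by_contra hc
      rw [FindBnd, dif_neg hc] at hfb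
      simp at hfb
    rw [FindBnd, dif_pos hin] at hfb
    by_cases hcond : PySem.List.pyGet? bs (i : Int) ≠ PySem.List.pyGet? bs ((i : Int) - 1)
    · rw [if_pos hcond] at hfb
      have : i = r := Option.some.inj hfb
      subst this
      rw [RunsRot, if_neg ((bnd_cond bs i hin).mp hcond)]
    · rw [if_neg hcond] at hfb
      have hcond' : (rotL bs i)[0]? = (rotL bs i).getLast? := by
        by_contra hc
        exact hcond ((bnd_cond bs i hin).mpr hc)
      have hge' := FindBnd_ge bs bs.length (i+1) r hfb
      rw [RunsRot, if_pos hcond', if_neg (by rw [rotL_length]; omega),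
          rotL_step bs i hin]
      exact IH (i+1) (by omega) hfb (by omega)

-- if FindBnd finds nothing from i on, there is no boundary in [i, n)
lemma FindBnd_none (bs : List Char) (n : Nat) : ∀ fuel i, n - i ≤ fuel →
    FindBnd bs n i = none → ∀ j, i ≤ j → j < n →
      PySem.List.pyGet? bs (j : Int) = PySem.List.pyGet? bs ((j : Int) - 1) := by
  intro fuel
  induction fuel with
  | zero => intro i hfi _ j hij hjn; omega
  | succ f IH =>
    intro i hfi hfb j hij hjn
    have hin : i < n := by omega
    rw [FindBnd, dif_pos hin] at hfb
    by_cases hcond : PySem.List.pyGet? bs (i : Int) ≠ PySem.List.pyGet? bs ((i : Int) - 1)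
    · rw [if_pos hcond] at hfb; simp at hfb
    · rw [if_neg hcond] at hfb
      rcases Nat.eq_or_lt_of_le hij with h | h
      · subst h; exact not_ne_iff.mp hcond
      · exact IH (i+1) (by omega) hfb j h hjn

-- no boundary anywhere means every element equals the head
lemma FindBnd_none_uniform (bs : List Char) (h : bs ≠ [])
    (hfb : FindBnd bs bs.length 0 = none) :
    ∀ x ∈ bs, x = bs.headD ' ' := by
  have key : ∀ j, j < bs.length → bs[j]? = bs[0]? := by
    intro j
    induction j using Nat.strongRecOn with
    | _ j IH =>
      intro hj
      rcases Nat.eq_zero_or_pos j with h0 | h0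
      · subst h0; rfl
      · have := FindBnd_none bs bs.length bs.length 0 (by omega) hfb j (by omega) hj
        have hcast : (j : Int) - 1 = ((j - 1 : Nat) : Int) := by omega
        rw [PySem.List.pyGet?_natCast, hcast, PySem.List.pyGet?_natCast] at this
        rw [this]
        exact IH (j-1) (by omega) (by omega)
  intro x hx
  obtain ⟨j, hj, hxj⟩ := List.mem_iff_getElem.mp hx
  have := key j hj
  rw [List.getElem?_eq_getElem hj, List.getElem?_eq_getElem (by omega)] at this
  have hx0 : x = bs[0]'(by omega) := by
    rw [← hxj]; exact Option.some.inj this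
  cases bs with
  | nil => simp at h
  | cons a l => simpa using hx0

-- A's while-loop on a uniform list hits the i > len(b) guard and returns {}
lemma RunsRot_replicate (n : Nat) (h : 0 < n) (c : Char) :
    ∀ fuel i, n + 2 ≤ fuel + i → RunsRot fuel (List.replicate n c) i = none := by
  intro fuel
  induction fuel with
  | zero => intro i hi; rfl
  | succ f IH =>
    intro i hi
    have hrep : (List.replicate n c).drop 1 ++ (List.replicate n c).take 1
        = List.replicate n c := by
      rw [List.drop_replicate, List.take_replicate]
      rw [← List.replicate_add]
      congr 1
      omega
    rw [RunsRot]
    have hhead : (List.replicate n c)[0]? = some c := by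
      rw [List.getElem?_eq_getElem (by simpa using h)]
      simp
    have hlast : (List.replicate n c).getLast? = some c := by
      rw [List.getLast?_eq_getElem?, List.getElem?_eq_getElem (by simp; omega)]
      simp
    rw [if_pos (by rw [hhead, hlast])]
    by_cases hguard : (List.replicate n c).length < i
    · rw [if_pos hguard]
    · rw [if_neg hguard, hrep]
      exact IH (i+1) (by simp at hguard; omega)

-- core counting lemma: A's sentinel-pair fold equals B's scan with a final flush
lemma count_eq (l : List Char) : ∀ (prev x : Char) (d : PySem.Dict Int Int) (run : Int),
    (prev :: l).getLast (by simp) ≠ x →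
    ((((prev :: l) ++ [x]).zip (((prev :: l) ++ [x]).tail)).foldl RunsStep (d, run)).1
      = CountRuns d run prev l := by
  induction l with
  | nil =>
    intro prev x d run hx
    simp only [List.getLast] at hx
    simp only [List.cons_append, List.nil_append, List.tail, List.zip,
      List.zipWith, List.foldl, RunsStep, if_neg hx, CountRuns]
  | cons c rest IH =>
    intro prev x d run hx
    have hx' : (c :: rest).getLast (by simp) ≠ x := by
      rwa [List.getLast_cons (by simp)] at hx
    simp only [List.cons_append, List.tail, List.zip, List.zipWith, List.foldl]
    by_cases hc : prev = c
    · rw [CountRuns, if_pos hc.symm, RunsStep, if_pos hc]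
      exact IH c x d (run + 1) hx'
    · rw [CountRuns, if_neg (fun hh => hc hh.symm), RunsStep, if_neg hc]
      exact IH c x (d.insert run (d.getD run 0 + 1)) 1 hx'

-- ===== VERDICT (by name: the statement is the Claim_ definition above) =====
theorem Runs_spec : Claim_equal_Runs := by
  intro b _ hpre
  unfold Spec_Runs Runs Runs_alt
  have hbs : b.toList ≠ [] := by
    intro hc
    apply hpre
    rwa [← String.toList_eq_nil_iff]
  set bs := b.toList with hbsdef
  have hn : 0 < bs.length := List.length_pos_of_ne_nil hbs
  rw [if_neg (by omega)]
  by_cases huni : bs.count (bs.headD ' ') = bs.length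
  · -- uniform string: both sides return []
    rw [if_pos huni]
    have hrep : bs = List.replicate bs.length (bs.headD ' ') := by
      apply List.eq_replicate_of_mem
      intro x hx
      exact (List.count_eq_length.mp huni x hx).symm
    rw [show RunsRot (bs.length + 2) bs 0
          = RunsRot (bs.length + 2) (List.replicate bs.length (bs.headD ' ')) 0 from by
        rw [← hrep],
      RunsRot_replicate bs.length hn (bs.headD ' ') (bs.length + 2) 0 (by omega)]
  · rw [if_neg huni]
    cases hfb : FindBnd bs bs.length 0 with
    | none =>
      exact absurd (List.count_eq_length.mpr
        (fun x hx => (FindBnd_none_uniform bs hbs hfb x hx).symm)) huni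
    | some r =>
      have hge := FindBnd_ge bs bs.length 0 r hfb
      have hrot := RunsRot_eq_rot bs r (bs.length + 2) 0 (by omega) hfb (by omega)
      rw [rotL_zero] at hrot
      rw [hrot]
      have hlen : (rotL bs r).length = bs.length := rotL_length bs r
      have hne : rotL bs r ≠ [] := by
        intro hc
        rw [hc] at hlen
        simp at hlen
        omega
      cases hrl : rotL bs r with
      | nil => exact absurd hrl hne
      | cons c0 ct =>
        have hrl' : bs.drop r ++ bs.take r = c0 :: ct := by rw [← hrl]; rfl
        show RunsCount (c0 :: ct)
          = match bs.drop r ++ bs.take r with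
            | [] => []
            | c :: rest => (CountRuns PySem.Dict.empty 1 c rest).items
        rw [hrl']
        show RunsCount (c0 :: ct) = (CountRuns PySem.Dict.empty 1 c0 ct).items
        rw [RunsCount]
        set x : Char := if (c0 :: ct).getLast? = some '1' then '0' else '1' with hxdef
        have hxne : (c0 :: ct).getLast (by simp) ≠ x := by
          rw [hxdef]
          by_cases h1 : (c0 :: ct).getLast? = some '1'
          · rw [if_pos h1]
            have : (c0 :: ct).getLast (by simp) = '1' := by
              have := List.getLast?_eq_some_getLast (l := c0 :: ct) (by simp)
              rw [h1] at this
              exact Option.some.inj this.symm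
            rw [this]; decide
          · rw [if_neg h1]
            intro hc
            exact h1 (by rw [List.getLast?_eq_some_getLast (l := c0 :: ct) (by simp), hc])
        exact congrArg PySem.Dict.items (count_eq ct c0 x PySem.Dict.empty 1 hxne)
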